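-- pv_equiv track=rewrite | github.com/scassells/C360WS2Tools | Cmap2Json.py | label2camel
-- ===== SOURCE A (Python) =====
-- def label2camel(s:str)->str:
--     strimmed = s.lstrip(" ").rstrip(" ")
--     sparts = strimmed.split(" ")
--     if len(sparts) == 0:
--         scamel = strimmed[:1].upper() + strimmed[1:]
--         return scamel
--     else:
--         scamel = ""
--     for word in sparts:
--         wordCamel = word[:1].upper() + word[1:]
--         scamel = scamel + wordCamel
--     return scamel
-- ===== SOURCE B (Python) =====
-- def label2camel(s: str) -> str:
--     out = []
--     at_word_start = True
--     for ch in s: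
--         if ch == ' ':
--             at_word_start = True
--         elif at_word_start:
--             out.append(ch.upper())
--             at_word_start = False
--         else:
--             out.append(ch)
--     return ''.join(out)
-- ===== Notes on version B (the rewrite author's own statement) =====
-- stated objective: simpler
-- what changed: Replaces strip+split+per-word capitalize with a single character pass keeping an at_word_start flag: spaces are skipped and the first character after a space (or at the start) is upper-cased.
import Mathlib
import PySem

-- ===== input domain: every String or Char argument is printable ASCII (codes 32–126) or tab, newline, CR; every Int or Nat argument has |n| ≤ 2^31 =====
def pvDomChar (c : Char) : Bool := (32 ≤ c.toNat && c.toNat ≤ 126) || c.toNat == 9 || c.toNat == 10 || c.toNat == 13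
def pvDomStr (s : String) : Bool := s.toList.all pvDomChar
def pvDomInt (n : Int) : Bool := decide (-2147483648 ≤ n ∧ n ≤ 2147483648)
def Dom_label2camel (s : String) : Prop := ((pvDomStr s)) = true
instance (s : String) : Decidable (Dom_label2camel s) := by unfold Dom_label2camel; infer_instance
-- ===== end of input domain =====

-- B replaces A's strip+split+per-word-capitalize with a single character pass keeping an
-- at-word-start flag (simpler decomposition, same O(n) cost).


-- ===== PORT A =====
-- word[:1].upper() + word[1:]  (on List Char)
def capWord (w : List Char) : List Char :=
  PySem.Chars.upper (PySem.List.slice w none (some 1)) ++ PySem.List.slice w (some 1) none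

-- s.lstrip(" ").rstrip(" ") is ported as stripChars s " " (strip both sides with chars = " ",
-- exactly the composition of the two calls); split(" ") is Chars.splitOn with sep [' '].
def label2camel (s : String) : String :=
  let strimmed : List Char := PySem.Chars.stripChars s.toList [' ']
  let sparts : List (List Char) := PySem.Chars.splitOn strimmed [' ']
  if sparts.length = 0 then
    String.ofList (capWord strimmed)
  else
    String.ofList (sparts.foldl (fun scamel word => scamel ++ capWord word) [])

-- ===== PORT B =====
-- the single pass of Source B: skip spaces, upper-case the first char after a space / at the start
def camelGo : List Char → Bool → List Char
  | [], _ => []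
  | c :: rest, atStart =>
    if c = ' ' then camelGo rest true
    else if atStart then PySem.Chars.upperChar c :: camelGo rest false
    else c :: camelGo rest false

def label2camel_alt (s : String) : String := String.ofList (camelGo s.toList true)

-- ===== PRECONDITION & SPEC =====
def Spec_label2camel (s : String) (out : String) : Prop := out = label2camel_alt s
instance (s : String) (out : String) : Decidable (Spec_label2camel s out) := by unfold Spec_label2camel; infer_instance

-- ===== CLAIM (what is proved, stated in full; the proofs are below) =====
def Claim_equal_label2camel : Prop := ∀ (s : String), Dom_label2camel s → Spec_label2camel s (label2camel s)

-- ===== LEMMAS AND PROOFS =====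

lemma capWord_nil : capWord [] = [] := by decide

lemma capWord_cons (c : Char) (t : List Char) :
    capWord (c :: t) = PySem.Chars.upperChar c :: t := by
  simp [capWord, PySem.List.slice, PySem.Chars.upper]

def Fcap (ws : List (List Char)) : List Char :=
  ws.foldl (fun scamel word => scamel ++ capWord word) []

lemma foldl_cap_init (ws : List (List Char)) :
    ∀ a : List Char, ws.foldl (fun scamel word => scamel ++ capWord word) a =
      a ++ ws.foldl (fun scamel word => scamel ++ capWord word) [] := by
  induction ws with
  | nil => intro a; simp
  | cons w ws ih =>
      intro a
      simp only [List.foldl_cons]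
      rw [ih (a ++ capWord w), ih ([] ++ capWord w)]
      simp

lemma Fcap_append (xs ys : List (List Char)) : Fcap (xs ++ ys) = Fcap xs ++ Fcap ys := by
  simp only [Fcap, List.foldl_append]
  rw [foldl_cap_init ys]

lemma capWord_reverse_append (cur : List Char) (c : Char) (h : cur ≠ []) :
    capWord (cur.reverse ++ [c]) = capWord cur.reverse ++ [c] := by
  rcases h' : cur.reverse with _ | ⟨d, t⟩
  · exact absurd (by simpa using congrArg List.reverse h') (by simpa using h)
  · simp [capWord_cons]

lemma go_invariant (fuel : Nat) :
    ∀ (l cur : List Char) (acc : List (List Char)), l.length < fuel →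
      Fcap (PySem.Chars.splitOn.go [' '] fuel l cur acc) =
        Fcap acc.reverse ++ capWord cur.reverse ++ camelGo l cur.isEmpty := by
  induction fuel with
  | zero => intro l cur acc h; omega
  | succ fuel ih =>
      intro l cur acc h
      cases l with
      | nil =>
          simp only [PySem.Chars.splitOn.go, camelGo]
          rw [show ((cur.reverse :: acc).reverse) = acc.reverse ++ [cur.reverse] by simp,
              Fcap_append]
          simp [Fcap]
      | cons c rest =>
          by_cases hc : c = ' '
          · subst hc
            have hpre : List.isPrefixOf [' '] (' ' :: rest) = true := by
              simp [List.isPrefixOf]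
            simp only [PySem.Chars.splitOn.go, hpre, if_true]
            rw [show List.drop [' '].length (' ' :: rest) = rest from rfl]
            rw [ih rest [] (cur.reverse :: acc) (by simpa using Nat.lt_of_succ_lt_succ h)]
            rw [show ((cur.reverse :: acc).reverse) = acc.reverse ++ [cur.reverse] by simp,
                Fcap_append]
            simp [Fcap, camelGo, capWord_nil]
          · have hpre : List.isPrefixOf [' '] (c :: rest) = false := by
              simp [List.isPrefixOf]
              intro h'; exact hc h'.symm
            simp only [PySem.Chars.splitOn.go, hpre]
            rw [if_neg (by simp)]
            rw [ih rest (c :: cur) acc (by simpa using Nat.lt_of_succ_lt_succ h)]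
            cases hcur : cur with
            | nil => simp [capWord_nil, capWord_cons, camelGo, hc]
            | cons d t =>
                rw [show ((c :: d :: t).reverse) = (d :: t).reverse ++ [c] by simp]
                rw [capWord_reverse_append (d :: t) c (by simp)]
                simp [camelGo, hc]

lemma go_ne_nil (fuel : Nat) :
    ∀ (l cur : List Char) (acc : List (List Char)),
      PySem.Chars.splitOn.go [' '] fuel l cur acc ≠ [] := by
  induction fuel with
  | zero => intro l cur acc; simp [PySem.Chars.splitOn.go]
  | succ fuel ih =>
      intro l cur acc
      cases l with
      | nil => simp [PySem.Chars.splitOn.go]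
      | cons c rest =>
          simp only [PySem.Chars.splitOn.go]
          by_cases hpre : List.isPrefixOf [' '] (c :: rest) = true
          · rw [if_pos hpre]; exact ih _ _ _
          · rw [if_neg hpre]; exact ih _ _ _

lemma camelGo_append_space (xs : List Char) : ∀ b, camelGo (xs ++ [' ']) b = camelGo xs b := by
  induction xs with
  | nil => intro b; simp [camelGo]
  | cons c t ih =>
      intro b
      by_cases hc : c = ' ' <;> simp [camelGo, hc, ih]

lemma camelGo_rstrip (cs : List Char) : ∀ b,
    camelGo (List.dropWhile (fun c => List.contains [' '] c) cs.reverse).reverse b = camelGo cs b := by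
  induction cs using List.reverseRecOn with
  | nil => intro b; simp
  | append_singleton xs c ih =>
      intro b
      by_cases hc : c = ' '
      · subst hc
        simp only [List.reverse_append, List.reverse_singleton, List.singleton_append,
          List.dropWhile_cons]
        rw [if_pos (by simp)]
        rw [ih b, camelGo_append_space]
      · simp only [List.reverse_append, List.reverse_singleton, List.singleton_append,
          List.dropWhile_cons]
        rw [if_neg (by simp [hc])]
        simp

lemma camelGo_lstrip (cs : List Char) :
    camelGo (List.dropWhile (fun c => List.contains [' '] c) cs) true = camelGo cs true := by
  induction cs with
  | nil => simp
  | cons c t ih =>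
      by_cases hc : c = ' '
      · subst hc
        simp only [List.dropWhile_cons]
        rw [if_pos (by simp)]
        simpa [camelGo] using ih
      · simp only [List.dropWhile_cons]
        rw [if_neg (by simp [hc])]

lemma camelGo_stripChars (cs : List Char) :
    camelGo (PySem.Chars.stripChars cs [' ']) true = camelGo cs true := by
  unfold PySem.Chars.stripChars
  rw [camelGo_rstrip, camelGo_lstrip]

-- ===== VERDICT (by name: the statement is the Claim_ definition above) =====
theorem label2camel_spec : Claim_equal_label2camel := by
  intro s _
  unfold Spec_label2camel label2camel label2camel_alt
  simp only []
  rw [if_neg (by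
    intro h0
    exact go_ne_nil _ _ _ _ (List.eq_nil_of_length_eq_zero h0))]
  have := go_invariant ((PySem.Chars.stripChars s.toList [' ']).length + 1)
      (PySem.Chars.stripChars s.toList [' ']) [] [] (by omega)
  unfold PySem.Chars.splitOn
  rw [show ((PySem.Chars.splitOn.go [' '] ((PySem.Chars.stripChars s.toList [' ']).length + 1)
      (PySem.Chars.stripChars s.toList [' ']) [] []).foldl
      (fun scamel word => scamel ++ capWord word) []) = Fcap _ from rfl]
  rw [this]
  simp only [List.reverse_nil, Fcap, List.foldl_nil, capWord_nil, List.isEmpty_nil,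
    List.nil_append]
  rw [camelGo_stripChars]
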